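-- pv_equiv track=rewrite | github.com/pitfox94/SOM | SOM.py | visualizar_mapa
-- ===== SOURCE A (Python) =====
-- def visualizar_mapa(mapa):
--     largo_neurona = len(mapa[0][0])
--     lista_cant = []
--     #Para cada dimension en las dimensiones de la neurona
--     #"dim" es el indice de producto el cual se le esta revisando las relaciones
--     for i in range(0,largo_neurona):
--         lista_cant.append([])
--     for dim in range(0,largo_neurona):
--         #Para cada fila en el mapa
--         for fil in range(0,len(mapa)):
--         #Para cada columna en el mapa
--             for col in range(0,len(mapa[fil])):
--                 producto1 = mapa[fil][col][dim]
--                 if (producto1 == 1):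
--                 #para cada dimension en la neurona con el producto indice "dim" = 1
--                     for dim2 in range(0,len(mapa[fil][col])):
--                     #Si el indice "dim2" es distinto del indice "dim"
--                     #quiere decir para no comprar el producto con el mismo
--                         if (dim2 != dim):
--                             producto2 = mapa[fil][col][dim2]
--                             if (producto2==1):
--                                 lista_cant[dim].append(dim2)
--     return lista_cant
-- ===== SOURCE B (Python) =====
-- def visualizar_mapa(mapa):
--     largo_neurona = len(mapa[0][0])
--     lista_cant = [[] for _ in range(largo_neurona)]
--     # one pass over the cells: find the products present in the cell, and only for
--     # those collect the cell's other active dims, instead of rescanning per dimension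
--     for fila in mapa:
--         for celda in fila:
--             presentes = [d for d in range(largo_neurona) if celda[d] == 1]
--             if presentes:
--                 activos = [j for j, v in enumerate(celda) if v == 1]
--                 for d in presentes:
--                     lista_cant[d].extend(j for j in activos if j != d)
--     return lista_cant
-- ===== Notes on version B (the rewrite author's own statement) =====
-- stated objective: faster
-- what changed: B makes a single pass over the cells, computing each cell's present and active dimensions once and appending only active-dim pairs, instead of A's rescan of the entire map once per dimension.
import Mathlib
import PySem

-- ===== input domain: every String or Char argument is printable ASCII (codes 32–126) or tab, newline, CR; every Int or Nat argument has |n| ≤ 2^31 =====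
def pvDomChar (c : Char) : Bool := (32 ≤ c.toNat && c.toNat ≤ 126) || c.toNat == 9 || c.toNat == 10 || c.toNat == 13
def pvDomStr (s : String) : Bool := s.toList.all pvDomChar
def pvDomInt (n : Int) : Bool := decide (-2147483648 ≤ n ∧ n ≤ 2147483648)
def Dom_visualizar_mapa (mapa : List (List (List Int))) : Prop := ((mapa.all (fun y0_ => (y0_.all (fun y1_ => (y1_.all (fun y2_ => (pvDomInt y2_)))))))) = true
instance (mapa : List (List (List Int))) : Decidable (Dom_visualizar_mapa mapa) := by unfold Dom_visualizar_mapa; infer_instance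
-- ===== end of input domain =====

-- B replaces A's per-dimension rescans of the whole map by a single pass over the cells,
-- computing each cell's active dimensions once and appending only active-dim pairs (objective: faster).

-- ===== PORT A =====
-- loop body of A's innermost block, for one cell `cell` and the current outer index `dim`
def innerA (cell : List Int) (dim : Nat) (lista : List (List Int)) : List (List Int) :=
  let producto1 := cell.getD dim 0
  if producto1 = 1 then
    (List.range cell.length).foldl (fun lista dim2 =>
      if dim2 ≠ dim then
        (let producto2 := cell.getD dim2 0
         if producto2 = 1 then lista.set dim (lista.getD dim [] ++ [(dim2 : Int)]) else lista)
      else lista) lista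
  else lista

def visualizar_mapa (mapa : List (List (List Int))) : List (List Int) :=
  let largo_neurona := ((mapa.headD []).headD []).length
  let lista_cant : List (List Int) := (List.range largo_neurona).foldl (fun l _ => l ++ [[]]) []
  (List.range largo_neurona).foldl (fun lista dim =>
    (List.range mapa.length).foldl (fun lista fil =>
      (List.range (mapa.getD fil []).length).foldl (fun lista col =>
        innerA ((mapa.getD fil []).getD col []) dim lista) lista) lista) lista_cant

-- ===== PORT B =====
def visualizar_mapa_alt (mapa : List (List (List Int))) : List (List Int) :=
  let largo_neurona := ((mapa.headD []).headD []).length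
  let lista_cant : List (List Int) := (List.range largo_neurona).map (fun _ => [])
  mapa.foldl (fun lista fila =>
    fila.foldl (fun lista celda =>
      let presentes := (List.range largo_neurona).filter (fun d => celda.getD d 0 = 1)
      if presentes = [] then lista
      else
        -- '[j for j, v in enumerate(celda) if v == 1]' ported by hand as the filtered index
        -- list (exact: j runs over 0..len(celda)-1 and v is celda[j])
        let activos := (List.range celda.length).filter (fun j => celda.getD j 0 = 1)
        presentes.foldl (fun lista d =>
          lista.set d (lista.getD d [] ++ (activos.filter (fun j => j ≠ d)).map (fun (j : Nat) => (j : Int))))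
          lista) lista) lista_cant

-- ===== PRECONDITION & SPEC =====
-- Pre_ excludes exactly the inputs on which Python A raises IndexError: an empty map / empty
-- first row (mapa[0][0] fails) or some cell shorter than the first cell (mapa[fil][col][dim] fails).
def Pre_visualizar_mapa (mapa : List (List (List Int))) : Prop :=
  mapa ≠ [] ∧ mapa.headD [] ≠ [] ∧
  ∀ fila ∈ mapa, ∀ cell ∈ fila, ((mapa.headD []).headD []).length ≤ cell.length
instance (mapa : List (List (List Int))) : Decidable (Pre_visualizar_mapa mapa) := by
  unfold Pre_visualizar_mapa; infer_instance
def pvWitness_visualizar_mapa : List (List (List Int)) := [[[1, 0], [0, 1]], [[1, 1], [0, 0]]]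

def Spec_visualizar_mapa (mapa : List (List (List Int))) (out : List (List Int)) : Prop := out = visualizar_mapa_alt mapa
instance (mapa : List (List (List Int))) (out : List (List Int)) : Decidable (Spec_visualizar_mapa mapa out) := by unfold Spec_visualizar_mapa; infer_instance

-- ===== CLAIM =====
def Claim_equal_visualizar_mapa : Prop := ∀ (mapa : List (List (List Int))), Dom_visualizar_mapa mapa → Pre_visualizar_mapa mapa → Spec_visualizar_mapa mapa (visualizar_mapa mapa)

-- ===== LEMMAS AND PROOFS =====

-- active dimensions of a cell, and a cell's contribution to slot `dim` (shared spec of both loops)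
def activosOf (cell : List Int) : List Nat :=
  (List.range cell.length).filter (fun j => cell.getD j 0 = 1)

def contrib (dim : Nat) (cell : List Int) : List Int :=
  if cell.getD dim 0 = 1 then ((activosOf cell).filter (fun j => j ≠ dim)).map (fun (j : Nat) => (j : Int))
  else []

-- a fold over `range xs.length` reading `xs.getD i` is a fold over `xs`
lemma foldl_range_getD {α β : Type} (xs : List α) (d : α) (f : β → α → β) (init : β) :
    (List.range xs.length).foldl (fun s i => f s (xs.getD i d)) init = xs.foldl f init := by
  induction xs generalizing init with
  | nil => rfl
  | cons x xs ih =>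
      simp [List.range_succ_eq_map, List.foldl_map]
      exact ih (f init x)

lemma set_getD_self (l : List (List Int)) (i : Nat) (h : i < l.length) :
    l.set i (l.getD i []) = l := by
  rw [List.getD_eq_getElem l [] h]; exact List.set_getElem_self h

lemma getD_set_self (l : List (List Int)) (i : Nat) (x : List Int) (h : i < l.length) :
    (l.set i x).getD i [] = x := by
  rw [List.getD_eq_getElem _ [] (by simpa using h)]
  exact List.getElem_set_self (by simpa using h)

lemma getD_set_ne (l : List (List Int)) (i j : Nat) (x : List Int) (h : i ≠ j) :
    (l.set i x).getD j [] = l.getD j [] := by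
  simp [List.getD]; rw [List.getElem?_set_ne h]

-- A's dim2-loop appends the filtered indices to slot dim
lemma slotFilterAppend (js : List Nat) (dim : Nat) (p : Nat → Bool) :
    ∀ l : List (List Int), dim < l.length →
      js.foldl (fun l j => if p j then l.set dim (l.getD dim [] ++ [(j : Int)]) else l) l
        = l.set dim (l.getD dim [] ++ (js.filter p).map (fun (j : Nat) => (j : Int))) := by
  induction js with
  | nil =>
      intro l h
      rw [List.foldl_nil, List.filter_nil, List.map_nil, List.append_nil,
        set_getD_self l dim h]
  | cons j js ih =>
      intro l h
      by_cases hp : p j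
      · simp only [List.foldl_cons, hp, if_pos]
        rw [ih _ (by simpa using h)]
        rw [List.set_set, getD_set_self l dim _ h]
        simp [hp, List.append_assoc]
      · simp only [List.foldl_cons, hp, if_neg, Bool.false_eq_true, not_false_iff]
        rw [ih _ h]
        simp [hp]

lemma innerA_eq (cell : List Int) (dim : Nat) (l : List (List Int)) (h : dim < l.length) :
    innerA cell dim l = l.set dim (l.getD dim [] ++ contrib dim cell) := by
  unfold innerA contrib
  by_cases hc : cell.getD dim 0 = 1
  · simp only [hc, if_pos]
    have hstep : (fun (lista : List (List Int)) (dim2 : Nat) =>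
        if dim2 ≠ dim then
          (let producto2 := cell.getD dim2 0
           if producto2 = 1 then lista.set dim (lista.getD dim [] ++ [(dim2 : Int)]) else lista)
        else lista)
      = (fun (lista : List (List Int)) (j : Nat) =>
          if (decide (j ≠ dim) && decide (cell.getD j 0 = 1)) then
            lista.set dim (lista.getD dim [] ++ [(j : Int)]) else lista) := by
      funext lista j
      by_cases h1 : j ≠ dim <;> by_cases h2 : cell.getD j 0 = 1
      · simp [h1]
      · simp [h1]
      · simp [h1]
      · simp [h1]
    rw [hstep, slotFilterAppend _ _ _ l h]
    have hfil : List.filter (fun j => decide (j ≠ dim) && decide (cell.getD j 0 = 1)) (List.range cell.length)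
        = List.filter (fun j => decide (j ≠ dim)) (activosOf cell) := by
      unfold activosOf
      rw [List.filter_filter]
    rw [hfil]
  · rw [if_neg hc, if_neg hc, List.append_nil, set_getD_self l dim h]

-- folding A's per-cell body over a list of cells, slot view
lemma cellsFoldA (cells : List (List Int)) (dim : Nat) :
    ∀ l : List (List Int), dim < l.length →
      cells.foldl (fun l cell => innerA cell dim l) l
        = l.set dim (l.getD dim [] ++ cells.flatMap (contrib dim)) := by
  induction cells with
  | nil => intro l h; rw [List.foldl_nil, List.flatMap_nil, List.append_nil, set_getD_self l dim h]
  | cons c cs ih =>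
      intro l h
      rw [List.foldl_cons, innerA_eq c dim l h, ih _ (by simpa using h),
        getD_set_self l dim _ h, List.set_set, List.flatMap_cons, List.append_assoc]

-- folding over the outer dims: each dim only touches its own slot
lemma dimsFoldA (ds : List Nat) (cells : List (List Int)) :
    ∀ l : List (List Int), ds.Nodup → (∀ d ∈ ds, d < l.length) →
      (ds.foldl (fun l dim => cells.foldl (fun l cell => innerA cell dim l) l) l).length = l.length ∧
      ∀ k, k < l.length →
        (ds.foldl (fun l dim => cells.foldl (fun l cell => innerA cell dim l) l) l).getD k []
          = l.getD k [] ++ (if k ∈ ds then cells.flatMap (contrib k) else []) := by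
  induction ds with
  | nil => intro l _ _; exact ⟨rfl, fun k _ => by simp⟩
  | cons d ds ih =>
      intro l hnd hlt
      have hd : d < l.length := hlt d (List.mem_cons_self)
      rw [List.foldl_cons, cellsFoldA cells d l hd]
      have hlen : (l.set d (l.getD d [] ++ cells.flatMap (contrib d))).length = l.length := by simp
      obtain ⟨ih1, ih2⟩ := ih (l.set d (l.getD d [] ++ cells.flatMap (contrib d)))
        (List.nodup_cons.mp hnd).2
        (fun x hx => by rw [hlen]; exact hlt x (List.mem_cons_of_mem _ hx))
      refine ⟨by rw [ih1, hlen], fun k hk => ?_⟩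
      rw [ih2 k (by rw [hlen]; exact hk)]
      by_cases hkd : k = d
      · subst hkd
        have hk_not : k ∉ ds := (List.nodup_cons.mp hnd).1
        rw [getD_set_self l k _ hd]
        simp [hk_not]
      · rw [getD_set_ne l d k _ (fun hh => hkd hh.symm)]
        by_cases hks : k ∈ ds <;> simp [hks, hkd]

-- B's per-cell fold over the slots, guarded by the cell's value at each slot
lemma slotsFoldB (ds : List Nat) (F : Nat → List Int) (P : Nat → Prop) [DecidablePred P] :
    ∀ l : List (List Int), (∀ d ∈ ds, d < l.length) → ds.Nodup →
      (ds.foldl (fun l d => if P d then l.set d (l.getD d [] ++ F d) else l) l).length = l.length ∧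
      ∀ k, (ds.foldl (fun l d => if P d then l.set d (l.getD d [] ++ F d) else l) l).getD k []
          = l.getD k [] ++ (if k ∈ ds ∧ P k then F k else []) := by
  induction ds with
  | nil => intro l _ _; exact ⟨rfl, fun k => by simp⟩
  | cons d ds ih =>
      intro l hlt hnd
      rw [List.foldl_cons]
      have hd' : d < l.length := hlt d List.mem_cons_self
      by_cases hd : P d
      · rw [if_pos hd]
        obtain ⟨ih1, ih2⟩ := ih (l.set d (l.getD d [] ++ F d))
          (fun x hx => by simpa using hlt x (List.mem_cons_of_mem _ hx))
          (List.nodup_cons.mp hnd).2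
        refine ⟨by rw [ih1]; simp, fun k => ?_⟩
        rw [ih2 k]
        by_cases hkd : k = d
        · subst hkd
          have hk_not : k ∉ ds := (List.nodup_cons.mp hnd).1
          rw [getD_set_self l k _ hd']
          simp [hk_not, hd]
        · rw [getD_set_ne l d k _ (fun hh => hkd hh.symm)]
          by_cases hks : k ∈ ds <;> simp [hks, hkd]
      · rw [if_neg hd]
        obtain ⟨ih1, ih2⟩ := ih l (fun x hx => hlt x (List.mem_cons_of_mem _ hx)) (List.nodup_cons.mp hnd).2
        refine ⟨ih1, fun k => ?_⟩
        rw [ih2 k]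
        by_cases hkd : k = d
        · subst hkd
          have hk_not : k ∉ ds := (List.nodup_cons.mp hnd).1
          simp [hk_not, hd]
        · by_cases hks : k ∈ ds <;> simp [hks, hkd]

-- B's per-cell step (the zeta-expansion of the port's cell body)
def stepB (largo : Nat) (celda : List Int) (lista : List (List Int)) : List (List Int) :=
  if (List.range largo).filter (fun d => celda.getD d 0 = 1) = [] then lista
  else ((List.range largo).filter (fun d => celda.getD d 0 = 1)).foldl (fun lista d =>
    lista.set d (lista.getD d [] ++ ((activosOf celda).filter (fun j => j ≠ d)).map (fun (j : Nat) => (j : Int))))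
    lista

lemma cellB_eq (celda : List Int) (largo : Nat) :
    ∀ l : List (List Int), l.length = largo →
      (stepB largo celda l).length = largo ∧
      ∀ k, k < largo →
        (stepB largo celda l).getD k [] = l.getD k [] ++ contrib k celda := by
  intro l hl
  unfold stepB
  by_cases hp : (List.range largo).filter (fun d => celda.getD d 0 = 1) = []
  · rw [if_pos hp]
    refine ⟨hl, fun k hk => ?_⟩
    have hknot : ¬ celda.getD k 0 = 1 := by
      intro h1
      have hmem : k ∈ (List.range largo).filter (fun d => celda.getD d 0 = 1) :=
        List.mem_filter.mpr ⟨List.mem_range.mpr hk, by simpa [List.getD] using h1⟩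
      rw [hp] at hmem
      simp at hmem
    unfold contrib
    rw [if_neg hknot, List.append_nil]
  · rw [if_neg hp]
    rw [PySem.List.foldl_congr_mem ((List.range largo).filter (fun d => celda.getD d 0 = 1))
      (fun lista d =>
        lista.set d (lista.getD d [] ++ ((activosOf celda).filter (fun j => j ≠ d)).map (fun (j : Nat) => (j : Int))))
      (fun lista d => if celda.getD d 0 = 1 then
        lista.set d (lista.getD d [] ++ ((activosOf celda).filter (fun j => j ≠ d)).map (fun (j : Nat) => (j : Int)))
        else lista) l
      (fun acc d hd => by
        beta_reduce
        rw [if_pos (show celda.getD d 0 = 1 by simpa [List.getD] using (List.mem_filter.mp hd).2)])]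
    obtain ⟨h1, h2⟩ := slotsFoldB ((List.range largo).filter (fun d => celda.getD d 0 = 1))
      (fun d => ((activosOf celda).filter (fun j => j ≠ d)).map (fun (j : Nat) => (j : Int)))
      (fun d => celda.getD d 0 = 1)
      l (fun d hd => by rw [hl]; exact List.mem_range.mp (List.mem_filter.mp hd).1)
      (List.Nodup.filter _ List.nodup_range)
    refine ⟨by rw [h1, hl], fun k hk => ?_⟩
    rw [h2 k]
    unfold contrib
    by_cases ha : celda.getD k 0 = 1
    · rw [if_pos ha, if_pos ⟨List.mem_filter.mpr ⟨List.mem_range.mpr hk, by simpa [List.getD] using ha⟩, ha⟩]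
    · rw [if_neg ha, if_neg (fun hh => ha hh.2)]

lemma cellsFoldB (cells : List (List Int)) (largo : Nat) :
    ∀ l : List (List Int), l.length = largo →
      (cells.foldl (fun lista celda => stepB largo celda lista) l).length = largo ∧
      ∀ k, k < largo →
        (cells.foldl (fun lista celda => stepB largo celda lista) l).getD k []
          = l.getD k [] ++ cells.flatMap (fun c => contrib k c) := by
  induction cells with
  | nil => intro l hl; exact ⟨hl, fun k _ => by simp⟩
  | cons c cs ih =>
      intro l hl
      rw [List.foldl_cons]
      obtain ⟨c1, c2⟩ := cellB_eq c largo l hl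
      obtain ⟨i1, i2⟩ := ih _ c1
      refine ⟨i1, fun k hk => ?_⟩
      rw [i2 k hk, c2 k hk, List.flatMap_cons, List.append_assoc]

lemma A_eq_spec (mapa : List (List (List Int))) :
    visualizar_mapa mapa
      = (List.range ((mapa.headD []).headD []).length).map
          (fun k => (mapa.flatten).flatMap (contrib k)) := by
  unfold visualizar_mapa
  show (List.range ((mapa.headD []).headD []).length).foldl
      (fun lista dim =>
        (List.range mapa.length).foldl (fun lista fil =>
          (List.range (mapa.getD fil []).length).foldl (fun lista col =>
            innerA ((mapa.getD fil []).getD col []) dim lista) lista) lista)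
      ((List.range ((mapa.headD []).headD []).length).foldl (fun l _ => l ++ [[]]) [])
    = _
  have h0 : (List.range ((mapa.headD []).headD []).length).foldl
      (fun (l : List (List Int)) _ => l ++ [[]]) []
      = List.replicate ((mapa.headD []).headD []).length [] := by
    rw [PySem.List.foldl_append_singleton_eq_map (f := fun _ => ([] : List Int))]
    simp [List.map_const']
  rw [h0]
  have hrows : ∀ (acc : List (List Int)) (dim : Nat),
      (List.range mapa.length).foldl (fun lista fil =>
        (List.range (mapa.getD fil []).length).foldl (fun lista col =>
          innerA ((mapa.getD fil []).getD col []) dim lista) lista) acc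
      = (mapa.flatten).foldl (fun l cell => innerA cell dim l) acc := by
    intro acc dim
    calc (List.range mapa.length).foldl (fun lista fil =>
          (List.range (mapa.getD fil []).length).foldl (fun lista col =>
            innerA ((mapa.getD fil []).getD col []) dim lista) lista) acc
        = mapa.foldl (fun lista fila =>
            (List.range fila.length).foldl (fun l col =>
              innerA (fila.getD col []) dim l) lista) acc :=
          foldl_range_getD mapa []
            (fun lista fila => (List.range fila.length).foldl
              (fun l col => innerA (fila.getD col []) dim l) lista) acc
      _ = mapa.foldl (fun lista fila =>
            fila.foldl (fun l cell => innerA cell dim l) lista) acc :=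
          PySem.List.foldl_congr_mem mapa _ _ acc (fun acc' fila _ => foldl_range_getD fila [] (fun l cell => innerA cell dim l) acc')
      _ = (mapa.flatten).foldl (fun l cell => innerA cell dim l) acc :=
          List.foldl_flatten.symm
  rw [PySem.List.foldl_congr_mem
    (List.range ((mapa.headD []).headD []).length)
    (fun (lista : List (List Int)) (dim : Nat) =>
      (List.range mapa.length).foldl (fun lista fil =>
        (List.range (mapa.getD fil []).length).foldl (fun lista col =>
          innerA ((mapa.getD fil []).getD col []) dim lista) lista) lista)
    (fun (lista : List (List Int)) (dim : Nat) =>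
      (mapa.flatten).foldl (fun l cell => innerA cell dim l) lista)
    (List.replicate ((mapa.headD []).headD []).length [])
    (fun acc dim _ => hrows acc dim)]
  obtain ⟨hlen, hget⟩ := dimsFoldA (List.range ((mapa.headD []).headD []).length)
    (mapa.flatten) (List.replicate ((mapa.headD []).headD []).length [])
    List.nodup_range (fun d hd => by simpa using List.mem_range.mp hd)
  apply List.ext_getElem
  · rw [hlen]; simp
  · intro i hi hi2
    have hil : i < ((mapa.headD []).headD []).length := by
      rw [hlen] at hi; simpa using hi
    rw [← List.getD_eq_getElem _ [] hi, ← List.getD_eq_getElem _ [] hi2,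
      hget i (by simpa using hil)]
    have hrep : (List.replicate ((mapa.headD []).headD []).length ([] : List Int)).getD i [] = [] := by
      rw [List.getD_eq_getElem _ _ (by simpa using hil)]; simp
    rw [hrep, if_pos (List.mem_range.mpr hil), List.nil_append,
      List.getD_eq_getElem _ [] hi2]
    simp

lemma B_eq_spec (mapa : List (List (List Int))) :
    visualizar_mapa_alt mapa
      = (List.range ((mapa.headD []).headD []).length).map
          (fun k => (mapa.flatten).flatMap (contrib k)) := by
  unfold visualizar_mapa_alt
  show mapa.foldl (fun lista fila => fila.foldl (fun lista celda =>
        stepB ((mapa.headD []).headD []).length celda lista) lista)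
      ((List.range ((mapa.headD []).headD []).length).map (fun _ => ([] : List Int)))
    = _
  have h0 : (List.range ((mapa.headD []).headD []).length).map (fun _ => ([] : List Int))
      = List.replicate ((mapa.headD []).headD []).length [] := by
    simp [List.map_const']
  rw [h0, ← List.foldl_flatten]
  obtain ⟨hlen, hget⟩ := cellsFoldB (mapa.flatten) ((mapa.headD []).headD []).length
    (List.replicate ((mapa.headD []).headD []).length []) (by simp)
  apply List.ext_getElem
  · rw [hlen]; simp
  · intro i hi hi2
    have hil : i < ((mapa.headD []).headD []).length := by rw [hlen] at hi; exact hi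
    rw [← List.getD_eq_getElem _ [] hi, ← List.getD_eq_getElem _ [] hi2, hget i hil]
    have hrep : (List.replicate ((mapa.headD []).headD []).length ([] : List Int)).getD i [] = [] := by
      rw [List.getD_eq_getElem _ _ (by simpa using hil)]; simp
    rw [hrep, List.nil_append, List.getD_eq_getElem _ [] hi2]
    simp

-- ===== VERDICT =====
theorem visualizar_mapa_spec : Claim_equal_visualizar_mapa := by
  intro mapa _ _
  unfold Spec_visualizar_mapa
  rw [A_eq_spec, B_eq_spec]
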